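-- pv_equiv track=rewrite | github.com/ajayspersonalacc1-beep/ADEA-hackathon | adea/utils/timeline.py | generate_pipeline_timeline
-- ===== SOURCE A (Python) =====
-- def generate_pipeline_timeline(logs: list[str]) -> list[dict[str, str]]:
--     """Parse execution logs into ordered pipeline lifecycle stages."""
--
--     timeline: list[dict[str, str]] = []
--     has_retry_routing = any(
--         "Workflow routing repaired pipeline back to executor" in log for log in logs
--     )
--     retry_executor_recorded = False
--
--     for index, log in enumerate(logs):
--         normalized_log = log.lower()
--
--         if "Generating pipeline" in log:
--             timeline.append({"stage": "Generator", "status": "success"})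
--             continue
--
--         if "Pipeline execution started" in log:
--             stage_name = "Executor"
--             if retry_executor_recorded or (
--                 has_retry_routing and index > 0 and any(
--                     "Workflow routing repaired pipeline back to executor" in previous_log
--                     for previous_log in logs[:index]
--                 )
--             ):
--                 stage_name = "RetryExecutor"
--
--             timeline.append({"stage": stage_name, "status": "start"})
--             continue
--
--         if "Pipeline execution failed" in log:
--             stage_name = "Executor"
--             if any(
--                 "RetryExecutor" == item["stage"] and item["status"] == "start"
--                 for item in timeline
--             ):
--                 stage_name = "RetryExecutor"
--
--             timeline.append({"stage": stage_name, "status": "failure"})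
--             continue
--
--         if "Monitoring classified anomaly" in log:
--             timeline.append({"stage": "Monitoring", "status": "success"})
--             continue
--
--         if "Schema discovery scanning" in log:
--             timeline.append({"stage": "SchemaDiscovery", "status": "success"})
--             continue
--
--         if "Diagnosis identified root cause" in log:
--             timeline.append({"stage": "Diagnosis", "status": "success"})
--             continue
--
--         if any(
--             marker in normalized_log
--             for marker in (
--                 "repair prepended",
--                 "repair agent used llm-generated repair",
--                 "repair reused a previously successful sql fix from memory",
--                 "repair rewrote the failing query",
--             )
--         ):
--             timeline.append({"stage": "Repair", "status": "success"})
--             continue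
--
--         if "Workflow routing repaired pipeline back to executor" in log:
--             timeline.append({"stage": "RetryExecutor", "status": "success"})
--             retry_executor_recorded = True
--             continue
--
--         if "Optimization generated" in log:
--             timeline.append({"stage": "Optimization", "status": "success"})
--
--     return timeline
-- ===== SOURCE B (Python) =====
-- ROUTING = "Workflow routing repaired pipeline back to executor"
--
--
-- def generate_pipeline_timeline(logs: list[str]) -> list[dict[str, str]]:
--     """Parse execution logs into ordered pipeline lifecycle stages.
--
--     Single forward pass: two booleans replace A's backward rescans.
--     """
--     timeline: list[dict[str, str]] = []
--     routing_seen = False      # a routing-repair marker occurred in an earlier log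
--     retry_start = False       # a {"stage": "RetryExecutor", "status": "start"} row was appended
--
--     for log in logs:
--         normalized_log = log.lower()
--
--         if "Generating pipeline" in log:
--             timeline.append({"stage": "Generator", "status": "success"})
--         elif "Pipeline execution started" in log:
--             if routing_seen:
--                 timeline.append({"stage": "RetryExecutor", "status": "start"})
--                 retry_start = True
--             else:
--                 timeline.append({"stage": "Executor", "status": "start"})
--         elif "Pipeline execution failed" in log:
--             stage = "RetryExecutor" if retry_start else "Executor"
--             timeline.append({"stage": stage, "status": "failure"})
--         elif "Monitoring classified anomaly" in log:
--             timeline.append({"stage": "Monitoring", "status": "success"})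
--         elif "Schema discovery scanning" in log:
--             timeline.append({"stage": "SchemaDiscovery", "status": "success"})
--         elif "Diagnosis identified root cause" in log:
--             timeline.append({"stage": "Diagnosis", "status": "success"})
--         elif ("repair prepended" in normalized_log
--               or "repair agent used llm-generated repair" in normalized_log
--               or "repair reused a previously successful sql fix from memory" in normalized_log
--               or "repair rewrote the failing query" in normalized_log):
--             timeline.append({"stage": "Repair", "status": "success"})
--         elif ROUTING in log:
--             timeline.append({"stage": "RetryExecutor", "status": "success"})
--         elif "Optimization generated" in log:
--             timeline.append({"stage": "Optimization", "status": "success"})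
--
--         if ROUTING in log:
--             routing_seen = True
--
--     return timeline
-- ===== Notes on version B (the rewrite author's own statement) =====
-- stated objective: faster
-- what changed: Replaced A's per-log backward rescans (the logs[:index] prefix scan, the timeline scan for a RetryExecutor start row, and the precomputed global any) by one forward pass that maintains two boolean flags.
import Mathlib
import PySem

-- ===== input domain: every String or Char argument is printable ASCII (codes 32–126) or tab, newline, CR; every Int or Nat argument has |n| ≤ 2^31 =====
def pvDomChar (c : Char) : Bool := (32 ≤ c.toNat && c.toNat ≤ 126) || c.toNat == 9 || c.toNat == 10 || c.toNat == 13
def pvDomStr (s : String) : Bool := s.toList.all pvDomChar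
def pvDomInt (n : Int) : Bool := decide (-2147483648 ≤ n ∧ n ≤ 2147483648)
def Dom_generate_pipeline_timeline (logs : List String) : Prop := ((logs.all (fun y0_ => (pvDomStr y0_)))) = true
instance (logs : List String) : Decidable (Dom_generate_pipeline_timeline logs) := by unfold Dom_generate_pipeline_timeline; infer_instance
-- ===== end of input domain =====

-- B replaces A's per-log backward rescans by one forward pass with two boolean flags (faster).

-- ===== PORT A =====
def pvMarker : String := "Workflow routing repaired pipeline back to executor"

def pvRow (stage status : String) : List (String × String) :=
  [("stage", stage), ("status", status)]

-- item["stage"] / item["status"]: every row A appends has both keys, so get? = some … is exact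
def pvIsRetryStart (item : List (String × String)) : Bool :=
  ((PySem.Dict.mk item).get? "stage" == some "RetryExecutor") &&
  ((PySem.Dict.mk item).get? "status" == some "start")

def pvStepA (logs : List String) (hasRetry : Bool)
    (st : List (List (String × String)) × Bool) (p : Int × String) :
    List (List (String × String)) × Bool :=
  let timeline := st.1
  let retryRec := st.2
  let index := p.1
  let log := p.2
  let normalized := PySem.Str.lower log
  if PySem.Str.isIn "Generating pipeline" log then
    (timeline ++ [pvRow "Generator" "success"], retryRec)
  else if PySem.Str.isIn "Pipeline execution started" log then
    let stage :=
      if retryRec || (hasRetry && decide (0 < index) &&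
          (PySem.List.slice logs none (some index)).any (fun pl => PySem.Str.isIn pvMarker pl))
      then "RetryExecutor" else "Executor"
    (timeline ++ [pvRow stage "start"], retryRec)
  else if PySem.Str.isIn "Pipeline execution failed" log then
    let stage := if timeline.any pvIsRetryStart then "RetryExecutor" else "Executor"
    (timeline ++ [pvRow stage "failure"], retryRec)
  else if PySem.Str.isIn "Monitoring classified anomaly" log then
    (timeline ++ [pvRow "Monitoring" "success"], retryRec)
  else if PySem.Str.isIn "Schema discovery scanning" log then
    (timeline ++ [pvRow "SchemaDiscovery" "success"], retryRec)
  else if PySem.Str.isIn "Diagnosis identified root cause" log then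
    (timeline ++ [pvRow "Diagnosis" "success"], retryRec)
  else if PySem.Str.isIn "repair prepended" normalized ||
          PySem.Str.isIn "repair agent used llm-generated repair" normalized ||
          PySem.Str.isIn "repair reused a previously successful sql fix from memory" normalized ||
          PySem.Str.isIn "repair rewrote the failing query" normalized then
    (timeline ++ [pvRow "Repair" "success"], retryRec)
  else if PySem.Str.isIn pvMarker log then
    (timeline ++ [pvRow "RetryExecutor" "success"], true)
  else if PySem.Str.isIn "Optimization generated" log then
    (timeline ++ [pvRow "Optimization" "success"], retryRec)
  else (timeline, retryRec)

def generate_pipeline_timeline (logs : List String) : List (List (String × String)) :=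
  let hasRetry := logs.any (fun l => PySem.Str.isIn pvMarker l)
  ((PySem.List.enumerate logs 0).foldl (pvStepA logs hasRetry) ([], false)).1

-- ===== PORT B =====
def pvStepB (st : List (List (String × String)) × Bool × Bool) (log : String) :
    List (List (String × String)) × Bool × Bool :=
  let timeline := st.1
  let routingSeen := st.2.1
  let retryStart := st.2.2
  let normalized := PySem.Str.lower log
  let next : List (List (String × String)) × Bool :=
    if PySem.Str.isIn "Generating pipeline" log then
      (timeline ++ [pvRow "Generator" "success"], retryStart)
    else if PySem.Str.isIn "Pipeline execution started" log then
      if routingSeen then (timeline ++ [pvRow "RetryExecutor" "start"], true)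
      else (timeline ++ [pvRow "Executor" "start"], retryStart)
    else if PySem.Str.isIn "Pipeline execution failed" log then
      (timeline ++ [pvRow (if retryStart then "RetryExecutor" else "Executor") "failure"], retryStart)
    else if PySem.Str.isIn "Monitoring classified anomaly" log then
      (timeline ++ [pvRow "Monitoring" "success"], retryStart)
    else if PySem.Str.isIn "Schema discovery scanning" log then
      (timeline ++ [pvRow "SchemaDiscovery" "success"], retryStart)
    else if PySem.Str.isIn "Diagnosis identified root cause" log then
      (timeline ++ [pvRow "Diagnosis" "success"], retryStart)
    else if PySem.Str.isIn "repair prepended" normalized ||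
            PySem.Str.isIn "repair agent used llm-generated repair" normalized ||
            PySem.Str.isIn "repair reused a previously successful sql fix from memory" normalized ||
            PySem.Str.isIn "repair rewrote the failing query" normalized then
      (timeline ++ [pvRow "Repair" "success"], retryStart)
    else if PySem.Str.isIn pvMarker log then
      (timeline ++ [pvRow "RetryExecutor" "success"], retryStart)
    else if PySem.Str.isIn "Optimization generated" log then
      (timeline ++ [pvRow "Optimization" "success"], retryStart)
    else (timeline, retryStart)
  (next.1, routingSeen || PySem.Str.isIn pvMarker log, next.2)

def generate_pipeline_timeline_alt (logs : List String) : List (List (String × String)) :=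
  (logs.foldl pvStepB ([], false, false)).1

-- ===== PRECONDITION & SPEC =====
def Spec_generate_pipeline_timeline (logs : List String) (out : List (List (String × String))) : Prop := out = generate_pipeline_timeline_alt logs
instance (logs : List String) (out : List (List (String × String))) : Decidable (Spec_generate_pipeline_timeline logs out) := by unfold Spec_generate_pipeline_timeline; infer_instance

-- ===== CLAIM (what is proved, stated in full; the proofs are below) =====
def Claim_equal_generate_pipeline_timeline : Prop := ∀ (logs : List String), Dom_generate_pipeline_timeline logs → Spec_generate_pipeline_timeline logs (generate_pipeline_timeline logs)

-- ===== LEMMAS AND PROOFS =====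

lemma pvIsRetryStart_row (a b : String) :
    pvIsRetryStart (pvRow a b) = (a == "RetryExecutor" && b == "start") := by
  simp [pvIsRetryStart, pvRow, PySem.Dict.get?_mk_cons]

lemma pv_main (hasRetry : Bool) (prev rest : List String)
    (tl : List (List (String × String))) (rRec rSeen rStart : Bool)
    (Hret : hasRetry = (prev ++ rest).any (fun l => PySem.Str.isIn pvMarker l))
    (H1 : rSeen = prev.any (fun l => PySem.Str.isIn pvMarker l))
    (H3 : rRec = true → rSeen = true)
    (H2 : rStart = tl.any pvIsRetryStart) :
    ((PySem.List.enumerate rest ((prev.length : Int))).foldl (pvStepA (prev ++ rest) hasRetry) (tl, rRec)).1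
      = (rest.foldl pvStepB (tl, rSeen, rStart)).1 := by
  induction rest generalizing prev tl rRec rSeen rStart with
  | nil => simp [PySem.List.enumerate_nil]
  | cons log rest ih =>
    subst H1; subst H2
    rw [PySem.List.enumerate_cons, List.foldl_cons, List.foldl_cons]
    have key : ∀ (tl' : List (List (String × String))) (rRec' rStart' : Bool),
        (rRec' = true → (prev.any (fun l => PySem.Str.isIn pvMarker l) || PySem.Str.isIn pvMarker log) = true) →
        (rStart' = tl'.any pvIsRetryStart) →
        ((PySem.List.enumerate rest ((prev.length : Int) + 1)).foldl (pvStepA (prev ++ log :: rest) hasRetry) (tl', rRec')).1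
          = (rest.foldl pvStepB (tl', prev.any (fun l => PySem.Str.isIn pvMarker l) || PySem.Str.isIn pvMarker log, rStart')).1 := by
      intro tl' rRec' rStart' h3' h2'
      have h := ih (prev ++ [log]) tl' rRec'
        (prev.any (fun l => PySem.Str.isIn pvMarker l) || PySem.Str.isIn pvMarker log) rStart'
        (by simpa [List.append_assoc] using Hret)
        (by simp [List.any_append])
        h3' h2'
      simpa [List.append_assoc] using h
    cases c1 : PySem.Str.isIn "Generating pipeline" log with
    | true =>
      have c1N := c1; simp at c1N
      rw [show pvStepA (prev ++ log :: rest) hasRetry (tl, rRec) (((prev.length : Nat) : Int), log)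
            = (tl ++ [pvRow "Generator" "success"], rRec) from by simp [pvStepA, c1N],
          show pvStepB (tl, prev.any (fun l => PySem.Str.isIn pvMarker l), tl.any pvIsRetryStart) log
            = (tl ++ [pvRow "Generator" "success"],
               prev.any (fun l => PySem.Str.isIn pvMarker l) || PySem.Str.isIn pvMarker log,
               tl.any pvIsRetryStart) from by simp [pvStepB, c1N]]
      exact key _ _ _ (fun h => by rw [H3 h]; simp) (by simp [List.any_append, pvIsRetryStart_row])
    | false =>
    cases c2 : PySem.Str.isIn "Pipeline execution started" log with
    | true =>
      have hslice : PySem.List.slice (prev ++ log :: rest) none (some ((prev.length : Nat) : Int)) = prev := by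
        rw [PySem.List.slice_to_natCast]; exact List.take_left
      cases hp : prev.any (fun l => PySem.Str.isIn pvMarker l) with
      | true =>
        have hne : prev ≠ [] := by rintro rfl; simp at hp
        have h0 : 0 < prev.length := List.length_pos_iff.mpr hne
        have hhr : hasRetry = true := by rw [Hret, List.any_append, hp]; simp
        have hpN := hp; simp at hpN
        have c1N := c1; simp at c1N
        have c2N := c2; simp at c2N
        rw [show pvStepA (prev ++ log :: rest) hasRetry (tl, rRec) (((prev.length : Nat) : Int), log)
              = (tl ++ [pvRow "RetryExecutor" "start"], rRec) from by
            simp [pvStepA, c1N, c2N, hslice, hpN, hhr, h0],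
            show pvStepB (tl, true, tl.any pvIsRetryStart) log
              = (tl ++ [pvRow "RetryExecutor" "start"],
                 prev.any (fun l => PySem.Str.isIn pvMarker l) || PySem.Str.isIn pvMarker log,
                 true) from by
            simp [pvStepB, c1N, c2N]
            exact Or.inl hpN]
        exact key _ _ _ (fun h => by rw [H3 h]; simp) (by simp [List.any_append, pvIsRetryStart_row])
      | false =>
        have hr : rRec = false := by
          cases hrc : rRec with
          | true => exact absurd (H3 hrc) (by rw [hp]; simp)
          | false => rfl
        have hpN := hp; simp at hpN
        have hex : ¬ ∃ x ∈ prev, PySem.Chars.isIn pvMarker.toList x.toList = true := by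
          simpa using hpN
        have c1N := c1; simp at c1N
        have c2N := c2; simp at c2N
        rw [show pvStepA (prev ++ log :: rest) hasRetry (tl, rRec) (((prev.length : Nat) : Int), log)
              = (tl ++ [pvRow "Executor" "start"], rRec) from by
            simp [pvStepA, c1N, c2N, hex, hr],
            show pvStepB (tl, false, tl.any pvIsRetryStart) log
              = (tl ++ [pvRow "Executor" "start"],
                 prev.any (fun l => PySem.Str.isIn pvMarker l) || PySem.Str.isIn pvMarker log,
                 tl.any pvIsRetryStart) from by simp [pvStepB, c1N, c2N, hex]]
        exact key _ _ _ (fun h => by rw [H3 h]; simp) (by simp [List.any_append, pvIsRetryStart_row])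
    | false =>
    cases c3 : PySem.Str.isIn "Pipeline execution failed" log with
    | true =>
      have c1N := c1; simp at c1N
      have c2N := c2; simp at c2N
      have c3N := c3; simp at c3N
      rw [show pvStepA (prev ++ log :: rest) hasRetry (tl, rRec) (((prev.length : Nat) : Int), log)
            = (tl ++ [pvRow (if tl.any pvIsRetryStart then "RetryExecutor" else "Executor") "failure"], rRec) from by simp [pvStepA, c1N, c2N, c3N],
          show pvStepB (tl, prev.any (fun l => PySem.Str.isIn pvMarker l), tl.any pvIsRetryStart) log
            = (tl ++ [pvRow (if tl.any pvIsRetryStart then "RetryExecutor" else "Executor") "failure"],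
               prev.any (fun l => PySem.Str.isIn pvMarker l) || PySem.Str.isIn pvMarker log,
               tl.any pvIsRetryStart) from by simp [pvStepB, c1N, c2N, c3N]]
      exact key _ _ _ (fun h => by rw [H3 h]; simp) (by cases hq : tl.any pvIsRetryStart <;> simp [List.any_append, pvIsRetryStart_row, hq])
    | false =>
    cases c4 : PySem.Str.isIn "Monitoring classified anomaly" log with
    | true =>
      have c1N := c1; simp at c1N
      have c2N := c2; simp at c2N
      have c3N := c3; simp at c3N
      have c4N := c4; simp at c4N
      rw [show pvStepA (prev ++ log :: rest) hasRetry (tl, rRec) (((prev.length : Nat) : Int), log)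
            = (tl ++ [pvRow "Monitoring" "success"], rRec) from by simp [pvStepA, c1N, c2N, c3N, c4N],
          show pvStepB (tl, prev.any (fun l => PySem.Str.isIn pvMarker l), tl.any pvIsRetryStart) log
            = (tl ++ [pvRow "Monitoring" "success"],
               prev.any (fun l => PySem.Str.isIn pvMarker l) || PySem.Str.isIn pvMarker log,
               tl.any pvIsRetryStart) from by simp [pvStepB, c1N, c2N, c3N, c4N]]
      exact key _ _ _ (fun h => by rw [H3 h]; simp) (by simp [List.any_append, pvIsRetryStart_row])
    | false =>
    cases c5 : PySem.Str.isIn "Schema discovery scanning" log with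
    | true =>
      have c1N := c1; simp at c1N
      have c2N := c2; simp at c2N
      have c3N := c3; simp at c3N
      have c4N := c4; simp at c4N
      have c5N := c5; simp at c5N
      rw [show pvStepA (prev ++ log :: rest) hasRetry (tl, rRec) (((prev.length : Nat) : Int), log)
            = (tl ++ [pvRow "SchemaDiscovery" "success"], rRec) from by simp [pvStepA, c1N, c2N, c3N, c4N, c5N],
          show pvStepB (tl, prev.any (fun l => PySem.Str.isIn pvMarker l), tl.any pvIsRetryStart) log
            = (tl ++ [pvRow "SchemaDiscovery" "success"],
               prev.any (fun l => PySem.Str.isIn pvMarker l) || PySem.Str.isIn pvMarker log,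
               tl.any pvIsRetryStart) from by simp [pvStepB, c1N, c2N, c3N, c4N, c5N]]
      exact key _ _ _ (fun h => by rw [H3 h]; simp) (by simp [List.any_append, pvIsRetryStart_row])
    | false =>
    cases c6 : PySem.Str.isIn "Diagnosis identified root cause" log with
    | true =>
      have c1N := c1; simp at c1N
      have c2N := c2; simp at c2N
      have c3N := c3; simp at c3N
      have c4N := c4; simp at c4N
      have c5N := c5; simp at c5N
      have c6N := c6; simp at c6N
      rw [show pvStepA (prev ++ log :: rest) hasRetry (tl, rRec) (((prev.length : Nat) : Int), log)
            = (tl ++ [pvRow "Diagnosis" "success"], rRec) from by simp [pvStepA, c1N, c2N, c3N, c4N, c5N, c6N],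
          show pvStepB (tl, prev.any (fun l => PySem.Str.isIn pvMarker l), tl.any pvIsRetryStart) log
            = (tl ++ [pvRow "Diagnosis" "success"],
               prev.any (fun l => PySem.Str.isIn pvMarker l) || PySem.Str.isIn pvMarker log,
               tl.any pvIsRetryStart) from by simp [pvStepB, c1N, c2N, c3N, c4N, c5N, c6N]]
      exact key _ _ _ (fun h => by rw [H3 h]; simp) (by simp [List.any_append, pvIsRetryStart_row])
    | false =>
    cases c7 : (PySem.Str.isIn "repair prepended" (PySem.Str.lower log) ||
                PySem.Str.isIn "repair agent used llm-generated repair" (PySem.Str.lower log) ||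
                PySem.Str.isIn "repair reused a previously successful sql fix from memory" (PySem.Str.lower log) ||
                PySem.Str.isIn "repair rewrote the failing query" (PySem.Str.lower log)) with
    | true =>
      have c1N := c1; simp at c1N
      have c2N := c2; simp at c2N
      have c3N := c3; simp at c3N
      have c4N := c4; simp at c4N
      have c5N := c5; simp at c5N
      have c6N := c6; simp at c6N
      have c7N := c7; simp at c7N
      rw [show pvStepA (prev ++ log :: rest) hasRetry (tl, rRec) (((prev.length : Nat) : Int), log)
            = (tl ++ [pvRow "Repair" "success"], rRec) from by simp [pvStepA, c1N, c2N, c3N, c4N, c5N, c6N, c7N],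
          show pvStepB (tl, prev.any (fun l => PySem.Str.isIn pvMarker l), tl.any pvIsRetryStart) log
            = (tl ++ [pvRow "Repair" "success"],
               prev.any (fun l => PySem.Str.isIn pvMarker l) || PySem.Str.isIn pvMarker log,
               tl.any pvIsRetryStart) from by simp [pvStepB, c1N, c2N, c3N, c4N, c5N, c6N, c7N]]
      exact key _ _ _ (fun h => by rw [H3 h]; simp) (by simp [List.any_append, pvIsRetryStart_row])
    | false =>
    cases c8 : PySem.Str.isIn pvMarker log with
    | true =>
      have c1N := c1; simp at c1N
      have c2N := c2; simp at c2N
      have c3N := c3; simp at c3N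
      have c4N := c4; simp at c4N
      have c5N := c5; simp at c5N
      have c6N := c6; simp at c6N
      have c7N := c7; simp at c7N
      have c8N := c8; simp at c8N
      rw [show pvStepA (prev ++ log :: rest) hasRetry (tl, rRec) (((prev.length : Nat) : Int), log)
            = (tl ++ [pvRow "RetryExecutor" "success"], true) from by simp [pvStepA, c1N, c2N, c3N, c4N, c5N, c6N, c7N, c8N],
          show pvStepB (tl, prev.any (fun l => PySem.Str.isIn pvMarker l), tl.any pvIsRetryStart) log
            = (tl ++ [pvRow "RetryExecutor" "success"],
               prev.any (fun l => PySem.Str.isIn pvMarker l) || PySem.Str.isIn pvMarker log,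
               tl.any pvIsRetryStart) from by simp [pvStepB, c1N, c2N, c3N, c4N, c5N, c6N, c7N, c8N]]
      exact key _ _ _ (fun _ => by rw [c8]; simp) (by simp [List.any_append, pvIsRetryStart_row])
    | false =>
    cases c9 : PySem.Str.isIn "Optimization generated" log with
    | true =>
      have c1N := c1; simp at c1N
      have c2N := c2; simp at c2N
      have c3N := c3; simp at c3N
      have c4N := c4; simp at c4N
      have c5N := c5; simp at c5N
      have c6N := c6; simp at c6N
      have c7N := c7; simp at c7N
      have c8N := c8; simp at c8N
      have c9N := c9; simp at c9N
      rw [show pvStepA (prev ++ log :: rest) hasRetry (tl, rRec) (((prev.length : Nat) : Int), log)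
            = (tl ++ [pvRow "Optimization" "success"], rRec) from by simp [pvStepA, c1N, c2N, c3N, c4N, c5N, c6N, c7N, c8N, c9N],
          show pvStepB (tl, prev.any (fun l => PySem.Str.isIn pvMarker l), tl.any pvIsRetryStart) log
            = (tl ++ [pvRow "Optimization" "success"],
               prev.any (fun l => PySem.Str.isIn pvMarker l) || PySem.Str.isIn pvMarker log,
               tl.any pvIsRetryStart) from by simp [pvStepB, c1N, c2N, c3N, c4N, c5N, c6N, c7N, c8N, c9N]]
      exact key _ _ _ (fun h => by rw [H3 h]; simp) (by simp [List.any_append, pvIsRetryStart_row])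
    | false =>
      have c1N := c1; simp at c1N
      have c2N := c2; simp at c2N
      have c3N := c3; simp at c3N
      have c4N := c4; simp at c4N
      have c5N := c5; simp at c5N
      have c6N := c6; simp at c6N
      have c7N := c7; simp at c7N
      have c8N := c8; simp at c8N
      have c9N := c9; simp at c9N
      rw [show pvStepA (prev ++ log :: rest) hasRetry (tl, rRec) (((prev.length : Nat) : Int), log)
            = (tl, rRec) from by simp [pvStepA, c1N, c2N, c3N, c4N, c5N, c6N, c7N, c8N, c9N],
          show pvStepB (tl, prev.any (fun l => PySem.Str.isIn pvMarker l), tl.any pvIsRetryStart) log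
            = (tl,
               prev.any (fun l => PySem.Str.isIn pvMarker l) || PySem.Str.isIn pvMarker log,
               tl.any pvIsRetryStart) from by simp [pvStepB, c1N, c2N, c3N, c4N, c5N, c6N, c7N, c8N, c9N]]
      exact key _ _ _ (fun h => by rw [H3 h]; simp) (rfl)

-- ===== VERDICT (by name: the statement is the Claim_ definition above) =====
theorem generate_pipeline_timeline_spec : Claim_equal_generate_pipeline_timeline := by
  intro logs _
  unfold Spec_generate_pipeline_timeline generate_pipeline_timeline generate_pipeline_timeline_alt
  have h := pv_main (logs.any (fun l => PySem.Str.isIn pvMarker l)) [] logs [] false false false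
    (by simp) (by simp) (by simp) (by simp)
  simpa using h
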